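-- pv_equiv track=rewrite | github.com/univention/univention-corporate-server | base/univention-system-activation/src/wsgi.py | clean_license_output
-- ===== SOURCE A (Python) =====
-- def clean_license_output(out):
--     # the output might contain the message of the day, as well
--     # ... let's clean up that!
--     ldif = []
--     for line in out.split('\n'):
--         if ldif and not line:
--             # first empty line after the LDIF -> stop
--             break
--         matchesLdifStart = line.startswith('dn:')
--         if not ldif and not matchesLdifStart:
--             # we have not yet found the beginning of the LDIF -> inspect next line
--             continue
--         # this line is part of the LDIF -> append to LDIF ldifput
--         ldif.append(line)
--     return '\n'.join(ldif)
-- ===== SOURCE B (Python) =====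
-- def clean_license_output(out):
--     # Two explicit phases instead of one flag-driven loop:
--     # 1) drop everything before the first 'dn:' line, 2) take the block up to the first blank line.
--     lines = out.split('\n')
--     while lines and not lines[0].startswith('dn:'):
--         lines.pop(0)
--     block = []
--     for line in lines:
--         if not line:
--             break
--         block.append(line)
--     return '\n'.join(block)
-- ===== Notes on version B (the rewrite author's own statement) =====
-- stated objective: simpler
-- what changed: Replaces the single flag-driven loop (accumulator emptiness as state) by two explicit stateless phases: drop leading lines until the first 'dn:' line, then collect lines until the first blank line.
import Mathlib
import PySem

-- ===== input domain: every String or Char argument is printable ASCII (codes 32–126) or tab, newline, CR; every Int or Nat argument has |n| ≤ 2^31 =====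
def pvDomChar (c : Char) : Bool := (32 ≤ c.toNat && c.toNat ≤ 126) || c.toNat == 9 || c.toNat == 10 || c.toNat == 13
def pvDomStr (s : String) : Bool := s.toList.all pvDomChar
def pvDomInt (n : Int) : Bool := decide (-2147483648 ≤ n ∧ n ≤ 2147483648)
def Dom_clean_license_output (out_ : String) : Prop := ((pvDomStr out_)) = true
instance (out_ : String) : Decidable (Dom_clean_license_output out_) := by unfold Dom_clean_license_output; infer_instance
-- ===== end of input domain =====

-- B replaces A's single flag-driven loop (accumulator emptiness as state) by two
-- explicit stateless phases: drop lines before the first 'dn:' line, then collect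
-- until the first blank line (objective: simpler).

-- ===== PORT A =====
-- A's single loop: state is the accumulator `ldif`; break on first empty line
-- after the block has started, skip lines before the first 'dn:' line.
def cloALoop (lines : List String) (ldif : List String) : List String :=
  match lines with
  | [] => ldif
  | line :: rest =>
    if ldif ≠ [] ∧ line = "" then ldif
    else if ldif = [] ∧ ¬ (PySem.Str.startswith line "dn:" = true) then cloALoop rest ldif
    else cloALoop rest (ldif ++ [line])

def clean_license_output (out_ : String) : String :=
  PySem.Str.join "\n" (cloALoop ((PySem.Str.split? out_ "\n").getD []) [])

-- ===== PORT B =====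
-- B phase 1: `while lines and not lines[0].startswith('dn:'): lines.pop(0)`
def cloDrop (lines : List String) : List String :=
  match lines with
  | [] => []
  | line :: rest =>
    if ¬ (PySem.Str.startswith line "dn:" = true) then cloDrop rest else line :: rest

-- B phase 2: collect lines until the first blank line
def cloTake (lines : List String) : List String :=
  match lines with
  | [] => []
  | line :: rest => if line = "" then [] else line :: cloTake rest

def clean_license_output_alt (out_ : String) : String :=
  PySem.Str.join "\n" (cloTake (cloDrop ((PySem.Str.split? out_ "\n").getD [])))

-- ===== PRECONDITION & SPEC =====
def Spec_clean_license_output (out_ : String) (out : String) : Prop := out = clean_license_output_alt out_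
instance (out_ : String) (out : String) : Decidable (Spec_clean_license_output out_ out) := by unfold Spec_clean_license_output; infer_instance

-- ===== CLAIM (what is proved, stated in full; the proofs are below) =====
def Claim_equal_clean_license_output : Prop := ∀ (out_ : String), Dom_clean_license_output out_ → Spec_clean_license_output out_ (clean_license_output out_)

-- ===== LEMMAS AND PROOFS =====

theorem startswith_dn_ne_empty (line : String)
    (h : PySem.Str.startswith line "dn:" = true) : line ≠ "" := by
  intro heq; subst heq; exact absurd h (by decide)

-- once the accumulator is nonempty, A's loop appends exactly B's phase-2 block
theorem cloALoop_nonempty (lines : List String) :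
    ∀ ldif : List String, ldif ≠ [] → cloALoop lines ldif = ldif ++ cloTake lines := by
  induction lines with
  | nil => intro ldif _; simp [cloALoop, cloTake]
  | cons line rest ih =>
    intro ldif hne
    by_cases hline : line = ""
    · simp [cloALoop, cloTake, hne, hline]
    · simp only [cloALoop, cloTake, if_neg (by simp [hne, hline] : ¬ (ldif ≠ [] ∧ line = "")),
        if_neg (by simp [hne] : ¬ (ldif = [] ∧ ¬ (PySem.Str.startswith line "dn:" = true))),
        if_neg hline]
      rw [ih (ldif ++ [line]) (by simp)]
      simp

-- with an empty accumulator, A's loop is B's two phases composed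
theorem cloALoop_empty (lines : List String) :
    cloALoop lines [] = cloTake (cloDrop lines) := by
  induction lines with
  | nil => simp [cloALoop, cloDrop, cloTake]
  | cons line rest ih =>
    by_cases hsw : PySem.Str.startswith line "dn:" = true
    · have hne : line ≠ "" := startswith_dn_ne_empty line hsw
      have hsw' : PySem.Chars.startswith line.toList ['d', 'n', ':'] = true := by
        simpa using hsw
      simp [cloALoop, cloDrop, hsw', cloALoop_nonempty rest [line] (by simp), cloTake, hne]
    · have hsw' : PySem.Chars.startswith line.toList ['d', 'n', ':'] = false := by
        simpa using hsw
      simp [cloALoop, cloDrop, hsw', ih]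

-- ===== VERDICT (by name: the statement is the Claim_ definition above) =====
theorem clean_license_output_spec : Claim_equal_clean_license_output := by
  intro out_ _
  unfold Spec_clean_license_output clean_license_output clean_license_output_alt
  rw [cloALoop_empty]
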